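-- pv_equiv track=rewrite | github.com/MrBrantCode/unitest_baseline | mut_generate/mist_train_taco/taco_2946/solution.py | count_alternating_paths
-- ===== SOURCE A (Python) =====
-- def count_alternating_paths(H, W, grid):
--     avail = [[True] * W for _ in range(H)]
--
--     def search(i, j, data):
--         if grid[i][j] == '#':
--             data[0] += 1
--         else:
--             data[1] += 1
--         avail[i][j] = False
--         if i + 1 < H and grid[i + 1][j] != grid[i][j] and avail[i + 1][j]:
--             search(i + 1, j, data)
--         if j + 1 < W and grid[i][j + 1] != grid[i][j] and avail[i][j + 1]:
--             search(i, j + 1, data)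
--         if i > 0 and grid[i][j] != grid[i - 1][j] and avail[i - 1][j]:
--             search(i - 1, j, data)
--         if j > 0 and grid[i][j] != grid[i][j - 1] and avail[i][j - 1]:
--             search(i, j - 1, data)
--
--     ans = 0
--     for i in range(H):
--         for j in range(W):
--             if avail[i][j]:
--                 data = [0, 0]
--                 search(i, j, data)
--                 ans += data[0] * data[1]
--
--     return ans
-- ===== SOURCE B (Python) =====
-- def count_alternating_paths(H, W, grid):
--     visited = set()
--     total = 0
--     for i in range(H):
--         for j in range(W):
--             if (i, j) in visited:
--                 continue
--             hashes = dots = 0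
--             stack = [(i, j)]
--             while stack:
--                 ci, cj = stack.pop()
--                 if (ci, cj) in visited:
--                     continue
--                 visited.add((ci, cj))
--                 c = grid[ci][cj]
--                 if c == '#':
--                     hashes += 1
--                 else:
--                     dots += 1
--                 if cj > 0 and grid[ci][cj - 1] != c:
--                     stack.append((ci, cj - 1))
--                 if ci > 0 and grid[ci - 1][cj] != c:
--                     stack.append((ci - 1, cj))
--                 if cj + 1 < W and grid[ci][cj + 1] != c:
--                     stack.append((ci, cj + 1))
--                 if ci + 1 < H and grid[ci + 1][cj] != c:
--                     stack.append((ci + 1, cj))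
--             total += hashes * dots
--     return total
-- ===== Notes on version B (the rewrite author's own statement) =====
-- stated objective: alternative
-- what changed: The mutable 2D boolean availability matrix and recursive nested-function DFS are replaced by an iterative explicit-stack flood fill over a set of coordinate pairs, with edge conditions checked at push time and the visited check moved to pop time; this also avoids Python's recursion-depth limit.
import Mathlib
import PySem

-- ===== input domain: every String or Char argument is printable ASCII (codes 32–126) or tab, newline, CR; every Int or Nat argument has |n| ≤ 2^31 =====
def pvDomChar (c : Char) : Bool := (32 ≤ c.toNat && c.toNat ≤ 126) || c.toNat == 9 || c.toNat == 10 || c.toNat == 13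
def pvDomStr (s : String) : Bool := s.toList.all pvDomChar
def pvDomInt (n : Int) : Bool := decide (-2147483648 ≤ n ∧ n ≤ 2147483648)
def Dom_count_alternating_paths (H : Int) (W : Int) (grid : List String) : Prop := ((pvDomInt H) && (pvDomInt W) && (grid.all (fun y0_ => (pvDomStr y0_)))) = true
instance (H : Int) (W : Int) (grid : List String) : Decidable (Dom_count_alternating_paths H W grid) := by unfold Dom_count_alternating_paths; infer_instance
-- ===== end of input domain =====

-- B replaces A's recursive DFS over a mutable 2D boolean matrix by an iterative explicit-stack
-- flood fill over a visited set of coordinate pairs (edge tests at push time, visited test at pop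
-- time); same return value (objective: alternative).

-- ===== PORT A =====
-- grid[i][j] as a total function (the default ' ' is never reached on inputs satisfying Pre_)
def pvGChar (grid : List String) (i j : Int) : Char :=
  (PySem.Str.pyGet? ((PySem.List.pyGet? grid i).getD "") j).getD ' '

-- avail[i][j] lookup / update (indices are always in range when used by the ports)
def pvMGet (m : List (List Bool)) (i j : Int) : Bool :=
  (m.getD i.toNat []).getD j.toNat false

def pvMSet (m : List (List Bool)) (i j : Int) (b : Bool) : List (List Bool) :=
  m.set i.toNat ((m.getD i.toNat []).set j.toNat b)

-- the nested 'search' of A; 'avail' and 'data' are threaded as state; fuel only totalizes the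
-- recursion (it bounds the depth; the caller passes H*W+1, enough for any visit sequence)
def searchA (H W : Int) (grid : List String) : Nat → Int → Int → List (List Bool) × Int × Int → List (List Bool) × Int × Int
  | 0, _, _, s => s
  | fuel+1, i, j, s =>
    let d : Int × Int := if pvGChar grid i j = '#' then (s.2.1 + 1, s.2.2) else (s.2.1, s.2.2 + 1)
    let s1 : List (List Bool) × Int × Int := (pvMSet s.1 i j false, d)
    let s2 := if i + 1 < H ∧ pvGChar grid (i+1) j ≠ pvGChar grid i j ∧ pvMGet s1.1 (i+1) j = true then
        searchA H W grid fuel (i+1) j s1 else s1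
    let s3 := if j + 1 < W ∧ pvGChar grid i (j+1) ≠ pvGChar grid i j ∧ pvMGet s2.1 i (j+1) = true then
        searchA H W grid fuel i (j+1) s2 else s2
    let s4 := if 0 < i ∧ pvGChar grid i j ≠ pvGChar grid (i-1) j ∧ pvMGet s3.1 (i-1) j = true then
        searchA H W grid fuel (i-1) j s3 else s3
    let s5 := if 0 < j ∧ pvGChar grid i j ≠ pvGChar grid i (j-1) ∧ pvMGet s4.1 i (j-1) = true then
        searchA H W grid fuel i (j-1) s4 else s4
    s5

def count_alternating_paths (H : Int) (W : Int) (grid : List String) : Int :=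
  let avail0 : List (List Bool) := (PySem.List.pyRange 0 H 1).map (fun _ => List.replicate W.toNat true)
  let r := (PySem.List.pyRange 0 H 1).foldl (fun (st : Int × List (List Bool)) i =>
      (PySem.List.pyRange 0 W 1).foldl (fun (st : Int × List (List Bool)) j =>
        if pvMGet st.2 i j = true then
          let r := searchA H W grid (H.toNat * W.toNat + 1) i j (st.2, 0, 0)
          (st.1 + r.2.1 * r.2.2, r.1)
        else st) st) ((0 : Int), avail0)
  r.1

-- ===== PORT B =====
-- the 'while stack:' loop of B; fuel only totalizes the loop (each iteration pops one entry;
-- the caller passes 4*H*W+1, enough since every visit pushes at most 4 entries)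
def stackLoopB (H W : Int) (grid : List String) : Nat → List (Int × Int) → PySem.Set (Int × Int) → Int → Int → PySem.Set (Int × Int) × Int × Int
  | 0, _, vis, hs, ds => (vis, hs, ds)
  | _+1, [], vis, hs, ds => (vis, hs, ds)
  | fuel+1, (ci, cj) :: rest, vis, hs, ds =>
    if PySem.Set.contains vis (ci, cj) = true then stackLoopB H W grid fuel rest vis hs ds
    else
      let vis' := PySem.Set.add vis (ci, cj)
      let c := pvGChar grid ci cj
      let hd : Int × Int := if c = '#' then (hs + 1, ds) else (hs, ds + 1)
      let st1 := if 0 < cj ∧ pvGChar grid ci (cj-1) ≠ c then (ci, cj-1) :: rest else rest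
      let st2 := if 0 < ci ∧ pvGChar grid (ci-1) cj ≠ c then (ci-1, cj) :: st1 else st1
      let st3 := if cj + 1 < W ∧ pvGChar grid ci (cj+1) ≠ c then (ci, cj+1) :: st2 else st2
      let st4 := if ci + 1 < H ∧ pvGChar grid (ci+1) cj ≠ c then (ci+1, cj) :: st3 else st3
      stackLoopB H W grid fuel st4 vis' hd.1 hd.2

def count_alternating_paths_alt (H : Int) (W : Int) (grid : List String) : Int :=
  let r := (PySem.List.pyRange 0 H 1).foldl (fun (st : Int × PySem.Set (Int × Int)) i =>
      (PySem.List.pyRange 0 W 1).foldl (fun (st : Int × PySem.Set (Int × Int)) j =>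
        if PySem.Set.contains st.2 (i, j) = true then st
        else
          let r := stackLoopB H W grid (4 * (H.toNat * W.toNat) + 1) [(i, j)] st.2 0 0
          (st.1 + r.2.1 * r.2.2, r.1)) st) ((0 : Int), PySem.Set.empty)
  r.1

-- ===== PRECONDITION & SPEC =====
-- Pre_ excludes exactly the inputs where Python A raises IndexError: when H > 0 and W > 0 the
-- program reads grid[i][j] for every 0 ≤ i < H, 0 ≤ j < W.
def Pre_count_alternating_paths (H : Int) (W : Int) (grid : List String) : Prop :=
  0 < H → 0 < W → H ≤ grid.length ∧ ∀ s ∈ grid.take H.toNat, W ≤ PySem.Str.len s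

instance (H : Int) (W : Int) (grid : List String) : Decidable (Pre_count_alternating_paths H W grid) := by
  unfold Pre_count_alternating_paths; infer_instance

def pvWitness_count_alternating_paths : Int × Int × List String := (2, 2, ["#.", ".#"])

def Spec_count_alternating_paths (H : Int) (W : Int) (grid : List String) (out : Int) : Prop := out = count_alternating_paths_alt H W grid
instance (H : Int) (W : Int) (grid : List String) (out : Int) : Decidable (Spec_count_alternating_paths H W grid out) := by unfold Spec_count_alternating_paths; infer_instance

-- ===== CLAIM (what is proved, stated in full; the proofs are below) =====
def Claim_equal_count_alternating_paths : Prop := ∀ (H : Int) (W : Int) (grid : List String), Dom_count_alternating_paths H W grid → Pre_count_alternating_paths H W grid → Spec_count_alternating_paths H W grid (count_alternating_paths H W grid)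

-- ===== LEMMAS AND PROOFS =====

-- in-range cell
def pvInR (H W : Int) (p : Int × Int) : Prop := 0 ≤ p.1 ∧ p.1 < H ∧ 0 ≤ p.2 ∧ p.2 < W

-- well-shaped availability matrix
def pvShape (H W : Int) (m : List (List Bool)) : Prop :=
  m.length = H.toNat ∧ ∀ r ∈ m, r.length = W.toNat

-- number of still-available cells (termination measure)
def pvTC (m : List (List Bool)) : Nat := (m.map (fun r => r.count true)).sum

-- the two representations of "visited" agree
def pvRel (H W : Int) (m : List (List Bool)) (vis : PySem.Set (Int × Int)) : Prop :=
  ∀ p : Int × Int, pvInR H W p → pvMGet m p.1 p.2 = !(PySem.Set.contains vis p)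

-- process a worklist of cells with A's search (canonical fuel pvTC s.1 at each start)
def procA (H W : Int) (grid : List String) : List (Int × Int) → List (List Bool) × Int × Int → List (List Bool) × Int × Int
  | [], s => s
  | (i, j) :: rest, s =>
      procA H W grid rest (if pvMGet s.1 i j = true then searchA H W grid (pvTC s.1) i j s else s)

-- neighbours a visit of (i,j) schedules, in A's processing order
def nbrs (H W : Int) (grid : List String) (i j : Int) : List (Int × Int) :=
  (if i + 1 < H ∧ pvGChar grid (i+1) j ≠ pvGChar grid i j then [(i+1, j)] else []) ++
  (if j + 1 < W ∧ pvGChar grid i (j+1) ≠ pvGChar grid i j then [(i, j+1)] else []) ++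
  (if 0 < i ∧ pvGChar grid (i-1) j ≠ pvGChar grid i j then [(i-1, j)] else []) ++
  (if 0 < j ∧ pvGChar grid i (j-1) ≠ pvGChar grid i j then [(i, j-1)] else [])

lemma procA_append (H W : Int) (grid : List String) (xs ys : List (Int × Int)) (s : List (List Bool) × Int × Int) :
    procA H W grid (xs ++ ys) s = procA H W grid ys (procA H W grid xs s) := by
  induction xs generalizing s with
  | nil => rfl
  | cons p rest ih => obtain ⟨i, j⟩ := p; simp [procA, ih]

lemma pvTC_cons (r : List Bool) (t : List (List Bool)) : pvTC (r :: t) = r.count true + pvTC t := by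
  simp [pvTC]

lemma count_set_le (l : List Bool) (n : Nat) : (l.set n false).count true ≤ l.count true := by
  induction l generalizing n with
  | nil => simp
  | cons a t ih =>
    cases n with
    | zero => cases a <;> simp
    | succ k =>
      have := ih k
      cases a <;> simp only [List.set_cons_succ, List.count_cons] <;> omega

lemma count_set_false (l : List Bool) (n : Nat) (h : l.getD n false = true) :
    (l.set n false).count true + 1 = l.count true := by
  induction l generalizing n with
  | nil => simp [List.getD] at h
  | cons a t ih =>
    cases n with
    | zero =>
      simp [List.getD] at h; subst h; simp
    | succ k =>
      have := ih k (by simpa [List.getD] using h)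
      cases a <;> simp only [List.set_cons_succ, List.count_cons] <;> omega

lemma pvTCn_set_le (m : List (List Bool)) (i j : Nat) :
    pvTC (m.set i ((m.getD i []).set j false)) ≤ pvTC m := by
  induction m generalizing i with
  | nil => simp
  | cons r t ih =>
    cases i with
    | zero =>
      simp only [List.getD_cons_zero, List.set_cons_zero, pvTC_cons]
      have := count_set_le r j
      omega
    | succ k =>
      simp only [List.getD_cons_succ, List.set_cons_succ, pvTC_cons]
      have := ih k
      omega

lemma pvTC_set_le (m : List (List Bool)) (i j : Int) : pvTC (pvMSet m i j false) ≤ pvTC m :=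
  pvTCn_set_le m i.toNat j.toNat

lemma pvTCn_set_false (m : List (List Bool)) (i j : Nat)
    (h : (m.getD i []).getD j false = true) :
    pvTC (m.set i ((m.getD i []).set j false)) + 1 = pvTC m := by
  induction m generalizing i with
  | nil => simp [List.getD] at h
  | cons r t ih =>
    cases i with
    | zero =>
      simp only [List.getD_cons_zero] at h
      simp only [List.getD_cons_zero, List.set_cons_zero, pvTC_cons]
      have := count_set_false r j h
      omega
    | succ k =>
      simp only [List.getD_cons_succ] at h
      simp only [List.getD_cons_succ, List.set_cons_succ, pvTC_cons]
      have := ih k h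
      omega

lemma pvTC_set_false (m : List (List Bool)) (i j : Int) (h : pvMGet m i j = true) :
    pvTC (pvMSet m i j false) + 1 = pvTC m :=
  pvTCn_set_false m i.toNat j.toNat h

lemma pvTC_pos (m : List (List Bool)) (i j : Int) (h : pvMGet m i j = true) : 1 ≤ pvTC m := by
  have := pvTC_set_false m i j h; omega

lemma pvTC_le_rows (w : Nat) : ∀ (m : List (List Bool)), (∀ r ∈ m, r.length = w) → pvTC m ≤ m.length * w
  | [], _ => by simp [pvTC]
  | r :: t, h => by
    have h1 : r.count true ≤ w := by
      have := @List.count_le_length _ _ true r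
      rw [h r (by simp)] at this; exact this
    have h2 := pvTC_le_rows w t (fun r hr => h r (by simp [hr]))
    rw [pvTC_cons]
    simp only [List.length_cons]
    calc r.count true + pvTC t ≤ w + t.length * w := by omega
      _ = (t.length + 1) * w := by ring

lemma pvTC_le_size (H W : Int) (m : List (List Bool)) (hs : pvShape H W m) :
    pvTC m ≤ H.toNat * W.toNat := by
  obtain ⟨hlen, hrow⟩ := hs
  have := pvTC_le_rows W.toNat m hrow
  rw [hlen] at this
  exact this

lemma pvMGet_eq (m : List (List Bool)) (i j : Int) :
    pvMGet m i j = (m[i.toNat]?.getD [])[j.toNat]?.getD false := by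
  simp [pvMGet, List.getD_eq_getElem?_getD]

lemma getD_row (m : List (List Bool)) (i : Nat) (hi : i < m.length) : m.getD i [] = m[i] := by
  rw [List.getD_eq_getElem?_getD, List.getElem?_eq_getElem hi]; rfl

lemma pvShape_set (H W : Int) (m : List (List Bool)) (i j : Int) (b : Bool) (hs : pvShape H W m) :
    pvShape H W (pvMSet m i j b) := by
  obtain ⟨hlen, hrow⟩ := hs
  refine ⟨by simp [pvMSet, hlen], ?_⟩
  intro r hr
  rcases List.mem_or_eq_of_mem_set hr with h | h
  · exact hrow r h
  · subst h
    by_cases hi : i.toNat < m.length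
    · rw [getD_row m i.toNat hi]
      simpa using hrow _ (List.getElem_mem hi)
    · rw [pvMSet, List.set_eq_of_length_le (by omega)] at hr
      exact hrow _ hr

lemma pvMGet_set_self (H W : Int) (m : List (List Bool)) (i j : Int) (b : Bool)
    (hs : pvShape H W m) (hin : pvInR H W (i, j)) : pvMGet (pvMSet m i j b) i j = b := by
  obtain ⟨hlen, hrow⟩ := hs
  obtain ⟨h1, h2, h3, h4⟩ := hin
  simp only at h1 h2 h3 h4
  have hi : i.toNat < m.length := by omega
  have hj : j.toNat < (m[i.toNat]?.getD []).length := by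
    rw [List.getElem?_eq_getElem hi, Option.getD_some, hrow _ (List.getElem_mem hi)]; omega
  rw [pvMGet_eq, pvMSet, List.getElem?_set_self hi, Option.getD_some,
      List.getD_eq_getElem?_getD, List.getElem?_set_self hj, Option.getD_some]

lemma pvMGet_set_ne (H W : Int) (m : List (List Bool)) (i j i' j' : Int) (b : Bool)
    (hin : pvInR H W (i, j)) (hin' : pvInR H W (i', j')) (hne : (i', j') ≠ (i, j)) :
    pvMGet (pvMSet m i j b) i' j' = pvMGet m i' j' := by
  obtain ⟨h1, h2, h3, h4⟩ := hin
  obtain ⟨h5, h6, h7, h8⟩ := hin'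
  simp only at h1 h2 h3 h4 h5 h6 h7 h8
  rw [pvMGet_eq, pvMGet_eq, pvMSet]
  by_cases hii : i'.toNat = i.toNat
  · have hij : j'.toNat ≠ j.toNat := by
      intro hjj
      apply hne
      have hi2 : i' = i := by omega
      have hj2 : j' = j := by omega
      rw [hi2, hj2]
    by_cases hi : i.toNat < m.length
    · rw [hii, List.getElem?_set_self hi, Option.getD_some,
          List.getD_eq_getElem?_getD, List.getElem?_set_ne (fun h => hij h.symm)]
    · rw [List.set_eq_of_length_le (by omega)]
  · rw [List.getElem?_set_ne (fun h => hii h.symm)]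

lemma contains_add (s : PySem.Set (Int × Int)) (x y : Int × Int) :
    PySem.Set.contains (PySem.Set.add s x) y = (PySem.Set.contains s y || y == x) := by
  by_cases h : PySem.Set.contains s x = true
  · rw [PySem.Set.add, if_pos h]
    by_cases hxy : (y == x) = true
    · have hy : y = x := eq_of_beq hxy
      subst hy
      rw [h, hxy]; rfl
    · have hf : (y == x) = false := Bool.eq_false_iff.mpr (fun hh => hxy hh)
      rw [hf, Bool.or_false]
  · rw [PySem.Set.add, if_neg h]
    have hbd : (y == x) = decide (y = x) := by
      by_cases hxy : y = x <;> simp [hxy]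
    simp [PySem.Set.contains, hbd]

lemma pvRel_step (H W : Int) (m : List (List Bool)) (vis : PySem.Set (Int × Int)) (p : Int × Int)
    (hs : pvShape H W m) (hrel : pvRel H W m vis) (hp : pvInR H W p) :
    pvRel H W (pvMSet m p.1 p.2 false) (PySem.Set.add vis p) := by
  intro q hq
  by_cases hqp : q = p
  · subst hqp
    rw [pvMGet_set_self H W m q.1 q.2 false hs (by exact hq), contains_add]
    simp
  · have hne : (q.1, q.2) ≠ (p.1, p.2) := by
      intro hcontra
      exact hqp (Prod.ext (congrArg Prod.fst hcontra) (congrArg Prod.snd hcontra))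
    rw [pvMGet_set_ne H W m p.1 p.2 q.1 q.2 false (by exact hp) (by exact hq) hne,
        contains_add, hrel q hq]
    have : (q == p) = false := beq_eq_false_iff_ne.mpr hqp
    rw [this, Bool.or_false]

lemma searchA_tc_le (H W : Int) (grid : List String) :
    ∀ (fuel : Nat) (i j : Int) (s : List (List Bool) × Int × Int),
      pvTC (searchA H W grid fuel i j s).1 ≤ pvTC s.1 := by
  intro fuel
  induction fuel with
  | zero => intro i j s; exact le_refl _
  | succ fuel ih =>
    intro i j s
    have step : ∀ (c : Prop) (inst : Decidable c) (i' j' : Int) (t : List (List Bool) × Int × Int),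
        pvTC (@ite _ c inst (searchA H W grid fuel i' j' t) t).1 ≤ pvTC t.1 := by
      intro c inst i' j' t
      by_cases h : c
      · rw [if_pos h]; exact ih i' j' t
      · rw [if_neg h]
    simp only [searchA]
    exact le_trans (step _ _ _ _ _) (le_trans (step _ _ _ _ _) (le_trans (step _ _ _ _ _)
      (le_trans (step _ _ _ _ _) (pvTC_set_le s.1 i j))))

lemma procA_tc_le (H W : Int) (grid : List String) :
    ∀ (l : List (Int × Int)) (s : List (List Bool) × Int × Int),
      pvTC (procA H W grid l s).1 ≤ pvTC s.1 := by
  intro l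
  induction l with
  | nil => intro s; exact le_refl _
  | cons p rest ih =>
    intro s
    obtain ⟨i, j⟩ := p
    simp only [procA]
    refine le_trans (ih _) ?_
    by_cases h : pvMGet s.1 i j = true
    · rw [if_pos h]; exact searchA_tc_le H W grid _ i j s
    · rw [if_neg h]

lemma nbrs_inR (H W : Int) (grid : List String) (i j : Int) (hin : pvInR H W (i, j)) :
    ∀ p ∈ nbrs H W grid i j, pvInR H W p := by
  obtain ⟨h1, h2, h3, h4⟩ := hin
  simp only at h1 h2 h3 h4
  intro p hp
  unfold nbrs at hp
  simp only [List.mem_append] at hp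
  rcases hp with ((hp | hp) | hp) | hp <;>
  · split at hp <;> simp_all [pvInR] <;> omega

lemma nbrs_len_le (H W : Int) (grid : List String) (i j : Int) :
    (nbrs H W grid i j).length ≤ 4 := by
  unfold nbrs
  split_ifs <;> simp

lemma searchA_proc (H W : Int) (grid : List String) :
    ∀ (n : Nat) (f : Nat) (i j : Int) (s : List (List Bool) × Int × Int),
      pvTC s.1 ≤ n → pvMGet s.1 i j = true → pvTC s.1 ≤ f →
      searchA H W grid f i j s =
        procA H W grid (nbrs H W grid i j)
          (pvMSet s.1 i j false,
           if pvGChar grid i j = '#' then (s.2.1 + 1, s.2.2) else (s.2.1, s.2.2 + 1)) := by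
  intro n
  induction n with
  | zero =>
    intro f i j s hn hget hf
    exact absurd (pvTC_pos s.1 i j hget) (by omega)
  | succ n ih =>
    intro f i j s hn hget hf
    have hpos := pvTC_pos s.1 i j hget
    obtain ⟨f', rfl⟩ : ∃ f', f = f' + 1 := ⟨f - 1, by omega⟩
    have htc1 : pvTC (pvMSet s.1 i j false) + 1 = pvTC s.1 := pvTC_set_false s.1 i j hget
    -- one leg: a guarded recursive call equals procA of the corresponding scheduled segment
    have legDown : ∀ (t : List (List Bool) × Int × Int), pvTC t.1 < pvTC s.1 → pvTC t.1 ≤ f' →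
        (if i + 1 < H ∧ pvGChar grid (i+1) j ≠ pvGChar grid i j ∧ pvMGet t.1 (i+1) j = true
          then searchA H W grid f' (i+1) j t else t)
        = procA H W grid (if i + 1 < H ∧ pvGChar grid (i+1) j ≠ pvGChar grid i j then [(i+1, j)] else []) t := by
      intro t ht htf
      by_cases hb : i + 1 < H ∧ pvGChar grid (i+1) j ≠ pvGChar grid i j
      · rw [if_pos hb]
        by_cases hg : pvMGet t.1 (i+1) j = true
        · rw [if_pos ⟨hb.1, hb.2, hg⟩]
          simp only [procA, if_pos hg]
          rw [ih f' (i+1) j t (by omega) hg htf,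
              ih (pvTC t.1) (i+1) j t (by omega) hg (le_refl _)]
        · rw [if_neg (by tauto)]
          simp only [procA, if_neg hg]
      · rw [if_neg (by tauto), if_neg hb]
        rfl
    have legRight : ∀ (t : List (List Bool) × Int × Int), pvTC t.1 < pvTC s.1 → pvTC t.1 ≤ f' →
        (if j + 1 < W ∧ pvGChar grid i (j+1) ≠ pvGChar grid i j ∧ pvMGet t.1 i (j+1) = true
          then searchA H W grid f' i (j+1) t else t)
        = procA H W grid (if j + 1 < W ∧ pvGChar grid i (j+1) ≠ pvGChar grid i j then [(i, j+1)] else []) t := by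
      intro t ht htf
      by_cases hb : j + 1 < W ∧ pvGChar grid i (j+1) ≠ pvGChar grid i j
      · rw [if_pos hb]
        by_cases hg : pvMGet t.1 i (j+1) = true
        · rw [if_pos ⟨hb.1, hb.2, hg⟩]
          simp only [procA, if_pos hg]
          rw [ih f' i (j+1) t (by omega) hg htf,
              ih (pvTC t.1) i (j+1) t (by omega) hg (le_refl _)]
        · rw [if_neg (by tauto)]
          simp only [procA, if_neg hg]
      · rw [if_neg (by tauto), if_neg hb]
        rfl
    have legUp : ∀ (t : List (List Bool) × Int × Int), pvTC t.1 < pvTC s.1 → pvTC t.1 ≤ f' →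
        (if 0 < i ∧ pvGChar grid i j ≠ pvGChar grid (i-1) j ∧ pvMGet t.1 (i-1) j = true
          then searchA H W grid f' (i-1) j t else t)
        = procA H W grid (if 0 < i ∧ pvGChar grid (i-1) j ≠ pvGChar grid i j then [(i-1, j)] else []) t := by
      intro t ht htf
      by_cases hb : 0 < i ∧ pvGChar grid (i-1) j ≠ pvGChar grid i j
      · rw [if_pos hb]
        by_cases hg : pvMGet t.1 (i-1) j = true
        · rw [if_pos ⟨hb.1, Ne.symm hb.2, hg⟩]
          simp only [procA, if_pos hg]
          rw [ih f' (i-1) j t (by omega) hg htf,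
              ih (pvTC t.1) (i-1) j t (by omega) hg (le_refl _)]
        · rw [if_neg (fun hcon => hg hcon.2.2)]
          simp only [procA, if_neg hg]
      · rw [if_neg (fun hcon => hb ⟨hcon.1, Ne.symm hcon.2.1⟩), if_neg hb]
        rfl
    have legLeft : ∀ (t : List (List Bool) × Int × Int), pvTC t.1 < pvTC s.1 → pvTC t.1 ≤ f' →
        (if 0 < j ∧ pvGChar grid i j ≠ pvGChar grid i (j-1) ∧ pvMGet t.1 i (j-1) = true
          then searchA H W grid f' i (j-1) t else t)
        = procA H W grid (if 0 < j ∧ pvGChar grid i (j-1) ≠ pvGChar grid i j then [(i, j-1)] else []) t := by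
      intro t ht htf
      by_cases hb : 0 < j ∧ pvGChar grid i (j-1) ≠ pvGChar grid i j
      · rw [if_pos hb]
        by_cases hg : pvMGet t.1 i (j-1) = true
        · rw [if_pos ⟨hb.1, Ne.symm hb.2, hg⟩]
          simp only [procA, if_pos hg]
          rw [ih f' i (j-1) t (by omega) hg htf,
              ih (pvTC t.1) i (j-1) t (by omega) hg (le_refl _)]
        · rw [if_neg (fun hcon => hg hcon.2.2)]
          simp only [procA, if_neg hg]
      · rw [if_neg (fun hcon => hb ⟨hcon.1, Ne.symm hcon.2.1⟩), if_neg hb]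
        rfl
    simp only [searchA, nbrs]
    rw [procA_append, procA_append, procA_append]
    have e1 := legDown (pvMSet s.1 i j false,
        if pvGChar grid i j = '#' then (s.2.1 + 1, s.2.2) else (s.2.1, s.2.2 + 1))
      (by show pvTC (pvMSet s.1 i j false) < pvTC s.1; omega)
      (by show pvTC (pvMSet s.1 i j false) ≤ f'; omega)
    rw [e1]
    have t2 : pvTC (procA H W grid
        (if i + 1 < H ∧ pvGChar grid (i+1) j ≠ pvGChar grid i j then [(i+1, j)] else [])
        (pvMSet s.1 i j false,
         if pvGChar grid i j = '#' then (s.2.1 + 1, s.2.2) else (s.2.1, s.2.2 + 1))).1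
        ≤ pvTC (pvMSet s.1 i j false) := procA_tc_le H W grid _ _
    have e2 := legRight _ (lt_of_le_of_lt t2 (by omega)) (le_trans t2 (by omega))
    rw [e2]
    have t3 : pvTC (procA H W grid
        (if j + 1 < W ∧ pvGChar grid i (j+1) ≠ pvGChar grid i j then [(i, j+1)] else []) _).1
        ≤ pvTC (pvMSet s.1 i j false) := le_trans (procA_tc_le H W grid _ _) t2
    have e3 := legUp _ (lt_of_le_of_lt t3 (by omega)) (le_trans t3 (by omega))
    rw [e3]
    have t4 : pvTC (procA H W grid
        (if 0 < i ∧ pvGChar grid (i-1) j ≠ pvGChar grid i j then [(i-1, j)] else []) _).1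
        ≤ pvTC (pvMSet s.1 i j false) := le_trans (procA_tc_le H W grid _ _) t3
    have e4 := legLeft _ (lt_of_le_of_lt t4 (by omega)) (le_trans t4 (by omega))
    rw [e4]

lemma searchA_fuel (H W : Int) (grid : List String) (f g : Nat) (i j : Int)
    (s : List (List Bool) × Int × Int) (hget : pvMGet s.1 i j = true)
    (hf : pvTC s.1 ≤ f) (hg : pvTC s.1 ≤ g) :
    searchA H W grid f i j s = searchA H W grid g i j s := by
  rw [searchA_proc H W grid (pvTC s.1) f i j s (le_refl _) hget hf,
      searchA_proc H W grid (pvTC s.1) g i j s (le_refl _) hget hg]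

lemma simL (H W : Int) (grid : List String) :
    ∀ (fuel : Nat) (stack : List (Int × Int)) (m : List (List Bool))
      (vis : PySem.Set (Int × Int)) (hs ds : Int),
      pvShape H W m → (∀ p ∈ stack, pvInR H W p) → pvRel H W m vis →
      stack.length + 4 * pvTC m ≤ fuel →
      (stackLoopB H W grid fuel stack vis hs ds).2 = (procA H W grid stack (m, hs, ds)).2 ∧
      pvRel H W (procA H W grid stack (m, hs, ds)).1 (stackLoopB H W grid fuel stack vis hs ds).1 ∧
      pvShape H W (procA H W grid stack (m, hs, ds)).1 := by
  intro fuel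
  induction fuel with
  | zero =>
    intro stack m vis hs ds hsh hwf hrel hb
    have : stack = [] := List.length_eq_zero_iff.mp (by omega)
    subst this
    exact ⟨rfl, hrel, hsh⟩
  | succ fuel ih =>
    intro stack m vis hs ds hsh hwf hrel hb
    cases stack with
    | nil => exact ⟨rfl, hrel, hsh⟩
    | cons p rest =>
      obtain ⟨ci, cj⟩ := p
      have hpin : pvInR H W (ci, cj) := hwf _ (by simp)
      have hrest : ∀ q ∈ rest, pvInR H W q := fun q hq => hwf q (by simp [hq])
      by_cases hc : PySem.Set.contains vis (ci, cj) = true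
      · have hget : pvMGet m ci cj = false := by
          have h2 : pvMGet m ci cj = !(PySem.Set.contains vis (ci, cj)) := hrel (ci, cj) hpin
          rw [h2, hc]; rfl
        simp only [stackLoopB, if_pos hc, procA]
        rw [if_neg (by rw [hget]; simp)]
        exact ih rest m vis hs ds hsh hrest hrel (by simp at hb ⊢; omega)
      · have hget : pvMGet m ci cj = true := by
          have h2 : pvMGet m ci cj = !(PySem.Set.contains vis (ci, cj)) := hrel (ci, cj) hpin
          rw [h2, Bool.eq_false_iff.mpr hc]; rfl
        have htc1 : pvTC (pvMSet m ci cj false) + 1 = pvTC m := pvTC_set_false m ci cj hget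
        -- A side: one search step = procA over the scheduled neighbours
        have hA : procA H W grid ((ci, cj) :: rest) (m, hs, ds) =
            procA H W grid (nbrs H W grid ci cj ++ rest)
              (pvMSet m ci cj false,
               if pvGChar grid ci cj = '#' then (hs + 1, ds) else (hs, ds + 1)) := by
          show procA H W grid rest
              (if pvMGet m ci cj = true then searchA H W grid (pvTC m) ci cj (m, hs, ds)
               else (m, hs, ds)) = _
          rw [if_pos hget,
              searchA_proc H W grid (pvTC m) (pvTC m) ci cj (m, hs, ds) (le_refl _) hget (le_refl _),
              ← procA_append]
        simp only [stackLoopB, if_neg hc]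
        rw [hA]
        -- B side: the new stack is exactly nbrs ++ rest
        have hst : (if ci + 1 < H ∧ pvGChar grid (ci+1) cj ≠ pvGChar grid ci cj then
              (ci + 1, cj) ::
                (if cj + 1 < W ∧ pvGChar grid ci (cj+1) ≠ pvGChar grid ci cj then
                  (ci, cj + 1) ::
                    (if 0 < ci ∧ pvGChar grid (ci-1) cj ≠ pvGChar grid ci cj then
                      (ci - 1, cj) ::
                        (if 0 < cj ∧ pvGChar grid ci (cj-1) ≠ pvGChar grid ci cj then
                          (ci, cj - 1) :: rest else rest)
                      else (if 0 < cj ∧ pvGChar grid ci (cj-1) ≠ pvGChar grid ci cj then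
                          (ci, cj - 1) :: rest else rest))
                  else (if 0 < ci ∧ pvGChar grid (ci-1) cj ≠ pvGChar grid ci cj then
                      (ci - 1, cj) ::
                        (if 0 < cj ∧ pvGChar grid ci (cj-1) ≠ pvGChar grid ci cj then
                          (ci, cj - 1) :: rest else rest)
                      else (if 0 < cj ∧ pvGChar grid ci (cj-1) ≠ pvGChar grid ci cj then
                          (ci, cj - 1) :: rest else rest)))
              else (if cj + 1 < W ∧ pvGChar grid ci (cj+1) ≠ pvGChar grid ci cj then
                  (ci, cj + 1) ::
                    (if 0 < ci ∧ pvGChar grid (ci-1) cj ≠ pvGChar grid ci cj then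
                      (ci - 1, cj) ::
                        (if 0 < cj ∧ pvGChar grid ci (cj-1) ≠ pvGChar grid ci cj then
                          (ci, cj - 1) :: rest else rest)
                      else (if 0 < cj ∧ pvGChar grid ci (cj-1) ≠ pvGChar grid ci cj then
                          (ci, cj - 1) :: rest else rest))
                  else (if 0 < ci ∧ pvGChar grid (ci-1) cj ≠ pvGChar grid ci cj then
                      (ci - 1, cj) ::
                        (if 0 < cj ∧ pvGChar grid ci (cj-1) ≠ pvGChar grid ci cj then
                          (ci, cj - 1) :: rest else rest)
                      else (if 0 < cj ∧ pvGChar grid ci (cj-1) ≠ pvGChar grid ci cj then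
                          (ci, cj - 1) :: rest else rest))))
            = nbrs H W grid ci cj ++ rest := by
          unfold nbrs
          by_cases h1 : ci + 1 < H ∧ pvGChar grid (ci+1) cj ≠ pvGChar grid ci cj <;>
          by_cases h2 : cj + 1 < W ∧ pvGChar grid ci (cj+1) ≠ pvGChar grid ci cj <;>
          by_cases h3 : 0 < ci ∧ pvGChar grid (ci-1) cj ≠ pvGChar grid ci cj <;>
          by_cases h4 : 0 < cj ∧ pvGChar grid ci (cj-1) ≠ pvGChar grid ci cj <;>
          simp [h1, h2, h3, h4]
        rw [hst]
        -- apply the induction hypothesis on the extended stack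
        have happ : ∀ q ∈ nbrs H W grid ci cj ++ rest, pvInR H W q := by
          intro q hq
          rcases List.mem_append.mp hq with h | h
          · exact nbrs_inR H W grid ci cj hpin q h
          · exact hrest q h
        have hlen := nbrs_len_le H W grid ci cj
        have hrel' := pvRel_step H W m vis (ci, cj) hsh hrel hpin
        have hsh' := pvShape_set H W m ci cj false hsh
        have hb' : (nbrs H W grid ci cj ++ rest).length + 4 * pvTC (pvMSet m ci cj false) ≤ fuel := by
          simp only [List.length_append] at *
          simp only [List.length_cons] at hb
          omega
        have := ih (nbrs H W grid ci cj ++ rest) (pvMSet m ci cj false) (PySem.Set.add vis (ci, cj))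
          (if pvGChar grid ci cj = '#' then hs + 1 else hs)
          (if pvGChar grid ci cj = '#' then ds else ds + 1)
          hsh' happ (by exact hrel') hb'
        -- align the bumped counters
        have hpair : ((if pvGChar grid ci cj = '#' then hs + 1 else hs : Int),
            (if pvGChar grid ci cj = '#' then ds else ds + 1 : Int)) =
            (if pvGChar grid ci cj = '#' then (hs + 1, ds) else (hs, ds + 1)) := by
          by_cases hch : pvGChar grid ci cj = '#' <;> simp [hch]
        rw [hpair] at this
        have hd1 : (if pvGChar grid ci cj = '#' then ((hs + 1 : Int), (ds : Int)) else (hs, ds + 1)).1 =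
            (if pvGChar grid ci cj = '#' then hs + 1 else hs) := by
          by_cases hch : pvGChar grid ci cj = '#' <;> simp [hch]
        have hd2 : (if pvGChar grid ci cj = '#' then ((hs + 1 : Int), (ds : Int)) else (hs, ds + 1)).2 =
            (if pvGChar grid ci cj = '#' then ds else ds + 1) := by
          by_cases hch : pvGChar grid ci cj = '#' <;> simp [hch]
        rw [hd1, hd2]
        exact this

lemma foldl_nested {σ : Type} (L1 L2 : List Int) (g : σ → Int → Int → σ) (init : σ) :
    L1.foldl (fun st i => L2.foldl (fun st j => g st i j) st) init
      = (L1.flatMap (fun i => L2.map (fun j => (i, j)))).foldl (fun st p => g st p.1 p.2) init := by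
  induction L1 generalizing init with
  | nil => rfl
  | cons a t ih =>
    simp only [List.flatMap_cons, List.foldl_append, List.foldl_cons, List.foldl_map]
    rw [← ih]

lemma mainFold (H W : Int) (grid : List String) :
    ∀ (cls : List (Int × Int)) (m : List (List Bool)) (vis : PySem.Set (Int × Int)) (ans : Int),
      pvShape H W m → pvRel H W m vis → (∀ p ∈ cls, pvInR H W p) →
      (cls.foldl (fun (st : Int × List (List Bool)) p =>
          if pvMGet st.2 p.1 p.2 = true then
            (st.1 + (searchA H W grid (H.toNat * W.toNat + 1) p.1 p.2 (st.2, 0, 0)).2.1 *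
                (searchA H W grid (H.toNat * W.toNat + 1) p.1 p.2 (st.2, 0, 0)).2.2,
             (searchA H W grid (H.toNat * W.toNat + 1) p.1 p.2 (st.2, 0, 0)).1)
          else st) (ans, m)).1
      = (cls.foldl (fun (st : Int × PySem.Set (Int × Int)) p =>
          if PySem.Set.contains st.2 (p.1, p.2) = true then st
          else
            (st.1 + (stackLoopB H W grid (4 * (H.toNat * W.toNat) + 1) [(p.1, p.2)] st.2 0 0).2.1 *
                (stackLoopB H W grid (4 * (H.toNat * W.toNat) + 1) [(p.1, p.2)] st.2 0 0).2.2,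
             (stackLoopB H W grid (4 * (H.toNat * W.toNat) + 1) [(p.1, p.2)] st.2 0 0).1)) (ans, vis)).1 := by
  intro cls
  induction cls with
  | nil => intro m vis ans _ _ _; rfl
  | cons p t ih =>
    intro m vis ans hsh hrel hwf
    obtain ⟨pi, pj⟩ := p
    have hpin : pvInR H W (pi, pj) := hwf _ (by simp)
    have htail : ∀ q ∈ t, pvInR H W q := fun q hq => hwf q (by simp [hq])
    simp only [List.foldl_cons]
    by_cases hc : PySem.Set.contains vis (pi, pj) = true
    · have hget : pvMGet m pi pj = false := by
        have h2 : pvMGet m pi pj = !(PySem.Set.contains vis (pi, pj)) := hrel (pi, pj) hpin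
        rw [h2, hc]; rfl
      rw [if_neg (show ¬(pvMGet m pi pj = true) by rw [hget]; simp), if_pos hc]
      exact ih m vis ans hsh hrel htail
    · have hget : pvMGet m pi pj = true := by
        have h2 : pvMGet m pi pj = !(PySem.Set.contains vis (pi, pj)) := hrel (pi, pj) hpin
        rw [h2, Bool.eq_false_iff.mpr hc]; rfl
      have hsize := pvTC_le_size H W m hsh
      have hsub := simL H W grid (4 * (H.toNat * W.toNat) + 1) [(pi, pj)] m vis 0 0 hsh
        (by intro q hq; simp at hq; subst hq; exact hpin) hrel (by simp; omega)
      have hp1 : procA H W grid [(pi, pj)] ((m, 0, 0) : List (List Bool) × Int × Int)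
          = searchA H W grid (pvTC m) pi pj (m, 0, 0) := by
        show procA H W grid []
            (if pvMGet m pi pj = true then searchA H W grid (pvTC m) pi pj (m, 0, 0)
             else (m, 0, 0)) = _
        rw [if_pos hget]
        rfl
      have hfuelA : searchA H W grid (H.toNat * W.toNat + 1) pi pj
            ((m, 0, 0) : List (List Bool) × Int × Int)
          = searchA H W grid (pvTC m) pi pj (m, 0, 0) :=
        searchA_fuel H W grid _ _ pi pj (m, 0, 0) hget
          (by show pvTC m ≤ H.toNat * W.toNat + 1; omega) (le_refl _)
      rw [if_pos (show pvMGet m pi pj = true from hget), if_neg hc]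
      rw [hfuelA, ← hp1]
      obtain ⟨h1, h2, h3⟩ := hsub
      rw [h1]
      exact ih _ _ _ h3 h2 htail

-- ===== VERDICT (by name: the statement is the Claim_ definition above) =====
theorem count_alternating_paths_spec : Claim_equal_count_alternating_paths := by
  unfold Claim_equal_count_alternating_paths
  intro H W grid hdom hpre
  unfold Spec_count_alternating_paths
  show count_alternating_paths H W grid = count_alternating_paths_alt H W grid
  simp only [count_alternating_paths, count_alternating_paths_alt]
  have havail : (PySem.List.pyRange 0 H 1).map (fun _ => List.replicate W.toNat true)
      = List.replicate H.toNat (List.replicate W.toNat true) := by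
    rw [List.map_const', PySem.List.length_pyRange_one]
    norm_num
  rw [havail]
  have hsh0 : pvShape H W (List.replicate H.toNat (List.replicate W.toNat true)) := by
    refine ⟨by simp, ?_⟩
    intro r hr
    rw [List.eq_of_mem_replicate hr]
    simp
  have hrel0 : pvRel H W (List.replicate H.toNat (List.replicate W.toNat true)) PySem.Set.empty := by
    intro p hp
    obtain ⟨h1, h2, h3, h4⟩ := hp
    have hi : p.1.toNat < H.toNat := by omega
    have hj : p.2.toNat < W.toNat := by omega
    rw [pvMGet_eq]
    simp [hi, hj, PySem.Set.empty, PySem.Set.contains]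
  have hwf0 : ∀ p ∈ (PySem.List.pyRange 0 H 1).flatMap
      (fun i => (PySem.List.pyRange 0 W 1).map (fun j => (i, j))), pvInR H W p := by
    intro p hp
    simp only [List.mem_flatMap, List.mem_map] at hp
    obtain ⟨i, hi, j, hj, rfl⟩ := hp
    rw [PySem.List.mem_pyRange_one] at hi hj
    exact ⟨hi.1, hi.2, hj.1, hj.2⟩
  exact Eq.trans (congrArg Prod.fst (foldl_nested _ _ _ _))
    (Eq.trans (mainFold H W grid _ _ _ _ hsh0 hrel0 hwf0)
      (congrArg Prod.fst (foldl_nested (PySem.List.pyRange 0 H 1) (PySem.List.pyRange 0 W 1)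
        (fun st i j =>
          if PySem.Set.contains st.2 (i, j) = true then st
          else
            (st.1 + (stackLoopB H W grid (4 * (H.toNat * W.toNat) + 1) [(i, j)] st.2 0 0).2.1 *
                (stackLoopB H W grid (4 * (H.toNat * W.toNat) + 1) [(i, j)] st.2 0 0).2.2,
             (stackLoopB H W grid (4 * (H.toNat * W.toNat) + 1) [(i, j)] st.2 0 0).1))
        ((0 : Int), (PySem.Set.empty : PySem.Set (Int × Int))))).symm)
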